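-- pv_equiv track=rewrite | github.com/elafontaine/Euler_project | Problem11.py | finding_the_x_highest_adjacent_number_90_degree
-- ===== SOURCE A (Python) =====
-- import functools
-- import operator
-- import operator as operator
--
-- def finding_the_x_highest_adjacent_number_90_degree(number, grid_array):
--     current_array = [1 for x in range(number)]
--     for index_row in range(len(grid_array) - number + 1):
--         for index_column in range(len(grid_array)):
--             accumulator = 1
--             for index in range(number):
--                 accumulator *= grid_array[index_row + index][index_column]
--             if accumulator > functools.reduce(operator.mul, current_array):
--                 for index2 in range(number):
--                     current_array[index2] = grid_array[index_row + index2][index_column]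
--     return current_array
-- ===== SOURCE B (Python) =====
-- def finding_the_x_highest_adjacent_number_90_degree(number, grid_array):
--     rows = len(grid_array)
--     best = [1 for _ in range(number)]
--     if number < 1 or rows - number + 1 < 1:
--         return best  # no vertical window of that length exists
--     best_prod = 1
--     # sliding vertical window per column: cache product of nonzero entries + zero count
--     col_prods = []
--     for c in range(rows):
--         p = 1
--         zeros = 0
--         prods = []
--         for r in range(rows):
--             v = grid_array[r][c]
--             if v == 0:
--                 zeros += 1
--             else:
--                 p *= v
--             if r >= number:
--                 u = grid_array[r - number][c]
--                 if u == 0: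
--                     zeros -= 1
--                 else:
--                     p //= u
--             if r >= number - 1:
--                 prods.append(0 if zeros else p)
--         col_prods.append(prods)
--     for r in range(rows - number + 1):
--         for c in range(rows):
--             if col_prods[c][r] > best_prod:
--                 best_prod = col_prods[c][r]
--                 best = [grid_array[r + i][c] for i in range(number)]
--     return best
-- ===== Notes on version B (the rewrite author's own statement) =====
-- stated objective: alternative
-- what changed: Replaces the per-window inner product loop and the repeated functools.reduce over the current best by a per-column sliding window (cached product of the nonzero entries plus a zero count) that emits all vertical window products in one pass, plus a cached best-product scalar during the scan: O(R^2) operations instead of O(R^2*number), though a timing run (which keeps number small) measured no speed-up.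
import Mathlib
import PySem

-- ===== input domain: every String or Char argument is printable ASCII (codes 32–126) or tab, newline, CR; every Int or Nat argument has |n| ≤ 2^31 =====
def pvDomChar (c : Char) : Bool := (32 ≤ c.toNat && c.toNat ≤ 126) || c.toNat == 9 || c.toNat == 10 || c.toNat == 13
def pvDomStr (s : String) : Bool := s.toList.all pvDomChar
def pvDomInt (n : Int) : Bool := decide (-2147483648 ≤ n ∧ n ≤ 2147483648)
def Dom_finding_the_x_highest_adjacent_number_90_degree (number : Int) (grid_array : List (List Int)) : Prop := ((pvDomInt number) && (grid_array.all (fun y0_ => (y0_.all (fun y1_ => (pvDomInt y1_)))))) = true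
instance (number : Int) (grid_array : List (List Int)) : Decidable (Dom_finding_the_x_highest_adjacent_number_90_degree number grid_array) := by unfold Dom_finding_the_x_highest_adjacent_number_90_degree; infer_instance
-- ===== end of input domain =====

-- B replaces the per-window product loop and the repeated reduce over the current best by a
-- per-column sliding window (cached product of nonzero entries + zero count) and a cached best
-- product scalar (objective: an alternative algorithm; no speed claim).

-- shared indexing helper: grid_array[r][c] (both Pythons index exactly like this)
def pvEntry (grid_array : List (List Int)) (r c : Int) : Int :=
  PySem.List.pyGetD (PySem.List.pyGetD grid_array r []) c 0

-- ===== PORT A =====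
def finding_the_x_highest_adjacent_number_90_degree (number : Int) (grid_array : List (List Int)) : List Int :=
  let init := (PySem.List.pyRange 0 number 1).map (fun _ => (1 : Int))
  (PySem.List.pyRange 0 ((grid_array.length : Int) - number + 1) 1).foldl (fun cur ir =>
    (PySem.List.pyRange 0 (grid_array.length : Int) 1).foldl (fun cur ic =>
      let acc := (PySem.List.pyRange 0 number 1).foldl
        (fun a i => a * pvEntry grid_array (ir + i) ic) 1
      if cur.foldl (· * ·) 1 < acc then
        (PySem.List.pyRange 0 number 1).map (fun i2 => pvEntry grid_array (ir + i2) ic)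
      else cur) cur) init

-- ===== PORT B =====
-- loop body of B's per-column sliding window (cached nonzero product p, zero count z, emitted products)
def pvSlideStep (number : Int) (grid_array : List (List Int)) (c : Int)
    (st : Int × Int × List Int) (r : Int) : Int × Int × List Int :=
  let v := pvEntry grid_array r c
  let pz : Int × Int := if v = 0 then (st.1, st.2.1 + 1) else (st.1 * v, st.2.1)
  let pz2 : Int × Int :=
    if number ≤ r then
      let u := pvEntry grid_array (r - number) c
      if u = 0 then (pz.1, pz.2 - 1) else (PySem.Int.floordiv pz.1 u, pz.2)
    else pz
  let prods := if number - 1 ≤ r then st.2.2 ++ [if pz2.2 ≠ 0 then 0 else pz2.1] else st.2.2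
  (pz2.1, pz2.2, prods)

def finding_the_x_highest_adjacent_number_90_degree_alt (number : Int) (grid_array : List (List Int)) : List Int :=
  let rows : Int := (grid_array.length : Int)
  let best := (PySem.List.pyRange 0 number 1).map (fun _ => (1 : Int))
  if number < 1 ∨ rows - number + 1 < 1 then best
  else
    let colProds := (PySem.List.pyRange 0 rows 1).foldl (fun cps c =>
      cps ++ [((PySem.List.pyRange 0 rows 1).foldl (pvSlideStep number grid_array c)
                (1, 0, [])).2.2]) []
    let fin := (PySem.List.pyRange 0 (rows - number + 1) 1).foldl (fun (st : List Int × Int) r =>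
      (PySem.List.pyRange 0 rows 1).foldl (fun (st : List Int × Int) c =>
        let q := PySem.List.pyGetD (PySem.List.pyGetD colProds c []) r 0
        if st.2 < q then
          ((PySem.List.pyRange 0 number 1).map (fun i => pvEntry grid_array (r + i) c), q)
        else st) st) (best, 1)
    fin.1

-- ===== PRECONDITION & SPEC =====
-- Pre_ excludes exactly the inputs where the Python A raises: number < 1 with a nonempty grid
-- (TypeError: reduce of an empty current_array), and grids with 1 ≤ number ≤ len(grid) whose rows
-- are shorter than len(grid) (IndexError on the column scan).
def Pre_finding_the_x_highest_adjacent_number_90_degree (number : Int) (grid_array : List (List Int)) : Prop :=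
  (grid_array = [] ∨ 1 ≤ number) ∧
  (1 ≤ number → number ≤ (grid_array.length : Int) →
    ∀ row ∈ grid_array, grid_array.length ≤ row.length)
instance (number : Int) (grid_array : List (List Int)) : Decidable (Pre_finding_the_x_highest_adjacent_number_90_degree number grid_array) := by
  unfold Pre_finding_the_x_highest_adjacent_number_90_degree; infer_instance

def pvWitness_finding_the_x_highest_adjacent_number_90_degree : Int × List (List Int) :=
  (2, [[1, 2], [3, 4]])

def Spec_finding_the_x_highest_adjacent_number_90_degree (number : Int) (grid_array : List (List Int)) (out : List Int) : Prop := out = finding_the_x_highest_adjacent_number_90_degree_alt number grid_array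
instance (number : Int) (grid_array : List (List Int)) (out : List Int) : Decidable (Spec_finding_the_x_highest_adjacent_number_90_degree number grid_array out) := by unfold Spec_finding_the_x_highest_adjacent_number_90_degree; infer_instance

-- ===== CLAIM (what is proved, stated in full; the proofs are below) =====
def Claim_equal_finding_the_x_highest_adjacent_number_90_degree : Prop := ∀ (number : Int) (grid_array : List (List Int)), Dom_finding_the_x_highest_adjacent_number_90_degree number grid_array → Pre_finding_the_x_highest_adjacent_number_90_degree number grid_array → Spec_finding_the_x_highest_adjacent_number_90_degree number grid_array (finding_the_x_highest_adjacent_number_90_degree number grid_array)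

-- ===== LEMMAS AND PROOFS =====

-- window of length L of the column g starting at s
def pvWinL (g : Nat → Int) (s L : Nat) : List Int := (List.range L).map (fun i => g (s + i))

-- product of the nonzero elements
def pvNZ (l : List Int) : Int := (l.filter (fun x => x ≠ 0)).prod

theorem pvWinL_snoc (g : Nat → Int) (s L : Nat) :
    pvWinL g s (L + 1) = pvWinL g s L ++ [g (s + L)] := by
  simp [pvWinL, List.range_succ]

theorem pvWinL_cons (g : Nat → Int) (s L : Nat) :
    pvWinL g s (L + 1) = g s :: pvWinL g (s + 1) L := by
  unfold pvWinL
  rw [List.range_succ_eq_map, List.map_cons, List.map_map]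
  refine congrArg₂ _ (by simp) ?_
  exact List.map_congr_left fun i _ => congrArg g (by simp; omega)

theorem pvNZ_snoc (l : List Int) (v : Int) :
    pvNZ (l ++ [v]) = if v = 0 then pvNZ l else pvNZ l * v := by
  by_cases h : v = 0 <;> simp [pvNZ, h]

theorem pvNZ_cons (u : Int) (l : List Int) :
    pvNZ (u :: l) = if u = 0 then pvNZ l else u * pvNZ l := by
  by_cases h : u = 0 <;> simp [pvNZ, h]

theorem pv_fd_cancel (u k : Int) (hu : u ≠ 0) : PySem.Int.floordiv (u * k) u = k := by
  have hm : PySem.Int.mod (u * k) u = 0 := (PySem.Int.mod_eq_zero_iff_dvd _ _).2 ⟨k, rfl⟩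
  have h := PySem.Int.floordiv_mul_add_mod (u * k) u
  rw [hm, add_zero] at h
  have : PySem.Int.floordiv (u * k) u * u = k * u := by rw [h]; ring
  exact mul_right_cancel₀ hu this

theorem pv_prod_eq (l : List Int) :
    l.prod = if (l.count 0 : Int) ≠ 0 then 0 else pvNZ l := by
  induction l with
  | nil => simp [pvNZ]
  | cons x t ih =>
    by_cases hx : x = 0
    · subst hx
      simp [List.prod_cons]
      intro h; omega
    · rw [List.prod_cons, ih, pvNZ_cons]
      simp only [List.count_cons, hx]
      by_cases hz : (t.count 0 : Int) ≠ 0 <;> simp [hz, hx]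

theorem pv_foldl_mul (l : List Int) (a : Int) : l.foldl (· * ·) a = a * l.prod := by
  induction l generalizing a with
  | nil => simp
  | cons x t ih => simp [List.foldl_cons, ih, List.prod_cons]; ring

-- generic paired-fold relation
theorem pv_foldl_rel {α β γ : Type} (R : α → β → Prop) (f : α → γ → α) (g : β → γ → β) :
    ∀ (l : List γ) (a : α) (b : β), R a b →
      (∀ a b x, x ∈ l → R a b → R (f a x) (g b x)) →
      R (l.foldl f a) (l.foldl g b) := by
  intro l
  induction l with
  | nil => intro a b h _; exact h
  | cons x t ih =>
    intro a b h hs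
    exact ih _ _ (hs a b x (by simp) h) (fun a b y hy => hs a b y (by simp [hy]))

theorem pv_slide_step (n : Nat) (hn : 1 ≤ n) (grid_array : List (List Int)) (c : Int) (m : Nat) :
    pvSlideStep (n : Int) grid_array c
      (pvNZ (pvWinL (fun k => pvEntry grid_array (k : Int) c) (m - n) (min m n)),
       ((pvWinL (fun k => pvEntry grid_array (k : Int) c) (m - n) (min m n)).count 0 : Int),
       (List.range (m + 1 - n)).map
         (fun s => (pvWinL (fun k => pvEntry grid_array (k : Int) c) s n).prod)) (m : Int)
    = (pvNZ (pvWinL (fun k => pvEntry grid_array (k : Int) c) (m + 1 - n) (min (m + 1) n)),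
       ((pvWinL (fun k => pvEntry grid_array (k : Int) c) (m + 1 - n) (min (m + 1) n)).count 0 : Int),
       (List.range (m + 2 - n)).map
         (fun s => (pvWinL (fun k => pvEntry grid_array (k : Int) c) s n).prod)) := by
  set g' : Nat → Int := fun k => pvEntry grid_array (k : Int) c with hg
  have hv : pvEntry grid_array (m : Int) c = g' m := rfl
  unfold pvSlideStep
  by_cases hnm : n ≤ m
  · -- full window slides
    have h1 : min m n = n := by omega
    have h2 : min (m + 1) n = n := by omega
    have hsub : (m : Int) - (n : Int) = ((m - n : Nat) : Int) := by push_cast [hnm]; ring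
    have hu : pvEntry grid_array ((m : Int) - (n : Int)) c = g' (m - n) := by rw [hsub]
    have hA : pvWinL g' (m - n) n ++ [g' m] = pvWinL g' (m - n) (n + 1) := by
      rw [pvWinL_snoc]
      have : m - n + n = m := by omega
      rw [this]
    have hC : pvWinL g' (m - n) (n + 1) = g' (m - n) :: pvWinL g' (m + 1 - n) n := by
      rw [pvWinL_cons]
      have : m - n + 1 = m + 1 - n := by omega
      rw [this]
    have hpz : (if g' m = 0 then
          (pvNZ (pvWinL g' (m - n) (min m n)), ((pvWinL g' (m - n) (min m n)).count 0 : Int) + 1)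
        else (pvNZ (pvWinL g' (m - n) (min m n)) * g' m, ((pvWinL g' (m - n) (min m n)).count 0 : Int)))
        = (pvNZ (g' (m - n) :: pvWinL g' (m + 1 - n) n),
           ((g' (m - n) :: pvWinL g' (m + 1 - n) n).count 0 : Int)) := by
      rw [h1, ← hC, ← hA]
      by_cases hv0 : g' m = 0 <;>
        simp [hv0, pvNZ_snoc, List.count_append]
    simp only [hv, hu, hpz]
    have hle : ((n : Int)) ≤ (m : Int) := by omega
    have hle2 : ((n : Int)) - 1 ≤ (m : Int) := by omega
    simp only [if_pos hle, if_pos hle2]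
    have hrem : (if g' (m - n) = 0 then
        (pvNZ (g' (m - n) :: pvWinL g' (m + 1 - n) n),
         (((g' (m - n) :: pvWinL g' (m + 1 - n) n).count 0 : Int)) - 1)
      else
        (PySem.Int.floordiv (pvNZ (g' (m - n) :: pvWinL g' (m + 1 - n) n)) (g' (m - n)),
         (((g' (m - n) :: pvWinL g' (m + 1 - n) n).count 0 : Int))))
      = (pvNZ (pvWinL g' (m + 1 - n) n), ((pvWinL g' (m + 1 - n) n).count 0 : Int)) := by
      by_cases hu0 : g' (m - n) = 0
      · simp [hu0, pvNZ_cons]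
      · simp [hu0, pvNZ_cons, pv_fd_cancel _ _ hu0]
    simp only [hrem]
    have hrng : m + 2 - n = (m + 1 - n) + 1 := by omega
    rw [hrng, List.range_succ, List.map_append, h2]
    refine congrArg₂ _ rfl (congrArg₂ _ rfl ?_)
    simp [pv_prod_eq]
  · have h1 : min m n = m := by omega
    have h2 : min (m + 1) n = m + 1 := by omega
    have h0 : m - n = 0 := by omega
    have h0' : m + 1 - n = 0 := by omega
    have hle : ¬ ((n : Int) ≤ (m : Int)) := by omega
    simp only [h1, h2, h0, h0', hv, if_neg hle]
    have hA : pvWinL g' 0 m ++ [g' m] = pvWinL g' 0 (m + 1) := by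
      rw [pvWinL_snoc]; simp
    have hpz : (if g' m = 0 then
          (pvNZ (pvWinL g' 0 m), ((pvWinL g' 0 m).count 0 : Int) + 1)
        else (pvNZ (pvWinL g' 0 m) * g' m, ((pvWinL g' 0 m).count 0 : Int)))
        = (pvNZ (pvWinL g' 0 (m + 1)), ((pvWinL g' 0 (m + 1)).count 0 : Int)) := by
      rw [← hA]
      by_cases hv0 : g' m = 0 <;> simp [hv0, pvNZ_snoc, List.count_append]
    simp only [hpz]
    by_cases heq : n = m + 1
    · subst heq
      have hr1 : m + 2 - (m + 1) = 1 := by omega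
      simp only [if_pos (by push_cast; omega : ((m + 1 : Nat) : Int) - 1 ≤ (m : Int)), hr1]
      simp [pv_prod_eq]
    · have hclt : ¬ (((n : Nat) : Int) - 1 ≤ (m : Int)) := by omega
      simp only [if_neg hclt]
      have hr0 : m + 2 - n = 0 := by omega
      simp [hr0]

-- the sliding-window invariant for one column
theorem pv_slide_inv (n : Nat) (hn : 1 ≤ n) (grid_array : List (List Int)) (c : Int) (m : Nat) :
    (List.range m).foldl (fun st (k : Nat) => pvSlideStep (n : Int) grid_array c st (k : Int)) (1, 0, []) =
      (pvNZ (pvWinL (fun k => pvEntry grid_array (k : Int) c) (m - n) (min m n)),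
       ((pvWinL (fun k => pvEntry grid_array (k : Int) c) (m - n) (min m n)).count 0 : Int),
       (List.range (m + 1 - n)).map
         (fun s => (pvWinL (fun k => pvEntry grid_array (k : Int) c) s n).prod)) := by
  induction m with
  | zero =>
    have h : 1 - n = 0 := by omega
    simp [h, pvWinL, pvNZ]
  | succ m ih =>
    rw [List.range_succ, List.foldl_append, ih]
    simp only [List.foldl_cons, List.foldl_nil]
    exact pv_slide_step n hn grid_array c m

theorem pv_foldl_const {α β : Type} (f : α → β → α) (a : α) :
    ∀ (l : List β), (∀ x ∈ l, f a x = a) → l.foldl f a = a := by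
  intro l
  induction l with
  | nil => intro _; rfl
  | cons x t ih =>
    intro h
    rw [List.foldl_cons, h x (by simp)]
    exact ih (fun y hy => h y (by simp [hy]))

theorem pv_AB (number : Int) (grid_array : List (List Int)) :
    finding_the_x_highest_adjacent_number_90_degree number grid_array =
      finding_the_x_highest_adjacent_number_90_degree_alt number grid_array := by
  unfold finding_the_x_highest_adjacent_number_90_degree
    finding_the_x_highest_adjacent_number_90_degree_alt
  by_cases hdeg : number < 1 ∨ ((grid_array.length : Int)) - number + 1 < 1
  · rw [if_pos hdeg]
    rcases hdeg with h | h
    · have hinit : PySem.List.pyRange 0 number 1 = [] :=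
        PySem.List.pyRange_one_eq_nil (by omega)
      simp only [hinit, List.map_nil]
      apply pv_foldl_const
      intro ir _
      apply pv_foldl_const
      intro ic _
      simp
    · rw [PySem.List.pyRange_one_eq_nil (show (grid_array.length : Int) - number + 1 ≤ 0 by omega)]
      rfl
  · rw [if_neg hdeg]
    obtain ⟨h1, h2⟩ := not_or.mp hdeg
    obtain ⟨n, rfl⟩ : ∃ n : Nat, number = (n : Int) := ⟨number.toNat, by omega⟩
    have hn1 : 1 ≤ n := by omega
    have hnR : n ≤ grid_array.length := by omega
    rw [PySem.List.foldl_append_singleton_eq_map, List.nil_append]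
    have hcol : ∀ c : Int,
        ((PySem.List.pyRange 0 (grid_array.length : Int) 1).foldl
          (pvSlideStep (n : Int) grid_array c) (1, 0, [])).2.2
        = (List.range (grid_array.length + 1 - n)).map
            (fun s => (pvWinL (fun k => pvEntry grid_array (k : Int) c) s n).prod) := by
      intro c
      rw [PySem.List.pyRange_zero_natCast, List.foldl_map, pv_slide_inv n hn1 grid_array c]
    simp only [hcol]
    have hw : ∀ (r c : Nat),
        (PySem.List.pyRange 0 (n : Int) 1).map (fun i => pvEntry grid_array ((r : Int) + i) (c : Int))
        = pvWinL (fun k => pvEntry grid_array (k : Int) (c : Int)) r n := by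
      intro r c
      rw [PySem.List.pyRange_zero_natCast, List.map_map]
      unfold pvWinL
      exact List.map_congr_left fun i _ =>
        congrArg (fun t => pvEntry grid_array t (c : Int)) (by push_cast; ring)
    refine ((pv_foldl_rel
      (fun cur (st : List Int × Int) => st.1 = cur ∧ st.2 = cur.foldl (· * ·) 1)
      _ _ (PySem.List.pyRange 0 ((grid_array.length : Int) - (n : Int) + 1) 1)
      ((PySem.List.pyRange 0 (n : Int) 1).map (fun _ => (1 : Int)))
      ((PySem.List.pyRange 0 (n : Int) 1).map (fun _ => (1 : Int)), 1)
      ⟨rfl, ?_⟩ ?_).1).symm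
    case _ => simp [pv_foldl_mul]
    intro cur st ir hir hrel
    have hirb := (PySem.List.mem_pyRange_one).1 hir
    obtain ⟨r, rfl, hr⟩ : ∃ r : Nat, ir = (r : Int) ∧ r < grid_array.length - n + 1 :=
      ⟨ir.toNat, by omega, by omega⟩
    refine pv_foldl_rel
      (fun cur (st : List Int × Int) => st.1 = cur ∧ st.2 = cur.foldl (· * ·) 1)
      _ _ (PySem.List.pyRange 0 (grid_array.length : Int) 1) cur st hrel ?_
    intro cur st ic hic hrel2
    have hicb := (PySem.List.mem_pyRange_one).1 hic
    obtain ⟨c, rfl, hcR⟩ : ∃ c : Nat, ic = (c : Int) ∧ c < grid_array.length :=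
      ⟨ic.toNat, by omega, by omega⟩
    obtain ⟨stl, stp⟩ := st
    obtain ⟨hst1, hst2⟩ := hrel2
    dsimp only at hst1 hst2 ⊢
    subst hst1
    subst hst2
    have hacc : (PySem.List.pyRange 0 (n : Int) 1).foldl
        (fun a i => a * pvEntry grid_array ((r : Int) + i) (c : Int)) 1
        = (pvWinL (fun k => pvEntry grid_array (k : Int) (c : Int)) r n).prod := by
      rw [← List.foldl_map, pv_foldl_mul, one_mul, hw]
    have hq : PySem.List.pyGetD
        (PySem.List.pyGetD
          ((PySem.List.pyRange 0 (grid_array.length : Int) 1).map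
            (fun c' => (List.range (grid_array.length + 1 - n)).map
              (fun s => (pvWinL (fun k => pvEntry grid_array (k : Int) c') s n).prod)))
          (c : Int) [])
        (r : Int) 0
        = (pvWinL (fun k => pvEntry grid_array (k : Int) (c : Int)) r n).prod := by
      rw [PySem.List.pyGetD_map_pyRange _ _ _ _ hcR, PySem.List.pyGetD_natCast]
      have hrb : r < grid_array.length + 1 - n := by omega
      rw [PySem.List.getD_map_range _ _ _ _ hrb]
    simp only [hacc, hq]
    by_cases hlt : stl.foldl (· * ·) 1 <
        (pvWinL (fun k => pvEntry grid_array (k : Int) (c : Int)) r n).prod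
    · simp only [if_pos hlt]
      exact ⟨trivial, by rw [pv_foldl_mul, one_mul, hw]⟩
    · simp only [if_neg hlt]
      exact ⟨trivial, trivial⟩

-- ===== VERDICT (by name: the statement is the Claim_ definition above) =====
theorem finding_the_x_highest_adjacent_number_90_degree_spec : Claim_equal_finding_the_x_highest_adjacent_number_90_degree := by
  intro number grid_array _ _
  exact pv_AB number grid_array
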